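-- pv_equiv track=rewrite | github.com/jcolinpatrick/kryptos | scripts/e_route_definitive.py | gen_diagonal
-- ===== SOURCE A (Python) =====
-- def read_order_to_perm(grid, nrows, ncols, cell_order):
--     """Convert a reading order to a permutation (output[i] = input[perm[i]])."""
--     perm = []
--     for r, c in cell_order:
--         if 0 <= r < nrows and 0 <= c < ncols:
--             val = grid[r][c]
--             if val >= 0:
--                 perm.append(val)
--     return perm
--
-- def gen_diagonal(grid, nrows, width, anti=False):
--     """Diagonal reading (NW-SE or NE-SW)."""
--     order = []
--     if not anti:
--         for d in range(nrows + width - 1):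
--             for r in range(max(0, d - width + 1), min(nrows, d + 1)):
--                 c = d - r
--                 order.append((r, c))
--     else:
--         for d in range(nrows + width - 1):
--             for r in range(max(0, d - width + 1), min(nrows, d + 1)):
--                 c = width - 1 - (d - r)
--                 if 0 <= c < width:
--                     order.append((r, c))
--     return read_order_to_perm(grid, nrows, width, order)
-- ===== SOURCE B (Python) =====
-- def gen_diagonal(grid, nrows, width, anti=False):
--     """Scatter row-major into per-diagonal buckets, then gather buckets in order."""
--     pairs = []
--     for r in range(min(nrows, len(grid))):
--         row = grid[r]
--         for c in range(min(width, len(row))):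
--             val = row[c]
--             if val >= 0:
--                 pairs.append((r + (width - 1 - c) if anti else r + c, val))
--     buckets = {}
--     for k, v in pairs:
--         buckets.setdefault(k, []).append(v)
--     perm = []
--     for d in range(nrows + width - 1):
--         perm += buckets.get(d, [])
--     return perm
-- ===== Notes on version B (the rewrite author's own statement) =====
-- stated objective: alternative
-- what changed: A enumerates diagonals and generates a bounds-checked (row,col) reading order that is then replayed against the grid; B makes one row-major pass over the actual cells, scattering each nonnegative value into a dict bucket keyed by its diagonal number, and then gathers the buckets in diagonal order.
import Mathlib
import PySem

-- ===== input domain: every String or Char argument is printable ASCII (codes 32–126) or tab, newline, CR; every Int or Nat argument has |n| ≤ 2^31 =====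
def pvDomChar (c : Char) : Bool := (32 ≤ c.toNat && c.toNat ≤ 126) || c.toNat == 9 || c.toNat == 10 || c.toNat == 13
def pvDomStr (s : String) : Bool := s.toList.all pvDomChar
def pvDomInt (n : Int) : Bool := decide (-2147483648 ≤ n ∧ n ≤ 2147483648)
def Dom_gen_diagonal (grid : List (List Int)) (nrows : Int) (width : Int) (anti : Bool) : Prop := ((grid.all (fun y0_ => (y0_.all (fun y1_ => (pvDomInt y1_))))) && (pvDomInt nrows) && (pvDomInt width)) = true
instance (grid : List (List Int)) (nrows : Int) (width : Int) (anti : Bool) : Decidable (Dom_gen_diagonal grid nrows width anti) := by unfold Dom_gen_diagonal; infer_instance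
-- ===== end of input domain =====

-- B replaces A's diagonal-by-diagonal order generation + bounds-checked reads by one row-major
-- scatter of the real cells into per-diagonal buckets (a dict keyed by diagonal number) followed
-- by a gather of the buckets in diagonal order (objective: alternative).

-- ===== PORT A =====
-- grid[r][c] is read with pyGetD: inside Pre_gen_diagonal both indices are always in range,
-- so the default is never used (outside Pre_gen_diagonal, Python raises IndexError there).
def read_order_to_perm (grid : List (List Int)) (nrows : Int) (ncols : Int)
    (cell_order : List (Int × Int)) : List Int :=
  cell_order.foldl (fun perm rc =>
    if 0 ≤ rc.1 ∧ rc.1 < nrows ∧ 0 ≤ rc.2 ∧ rc.2 < ncols then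
      let val := PySem.List.pyGetD (PySem.List.pyGetD grid rc.1 []) rc.2 0
      if val ≥ 0 then perm ++ [val] else perm
    else perm) []

def gen_diagonal (grid : List (List Int)) (nrows : Int) (width : Int) (anti : Bool) : List Int :=
  let order : List (Int × Int) :=
    if !anti then
      (PySem.List.pyRange 0 (nrows + width - 1) 1).foldl (fun order d =>
        (PySem.List.pyRange (max 0 (d - width + 1)) (min nrows (d + 1)) 1).foldl
          (fun order r => order ++ [(r, d - r)]) order) []
    else
      (PySem.List.pyRange 0 (nrows + width - 1) 1).foldl (fun order d =>
        (PySem.List.pyRange (max 0 (d - width + 1)) (min nrows (d + 1)) 1).foldl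
          (fun order r =>
            let c := width - 1 - (d - r)
            if 0 ≤ c ∧ c < width then order ++ [(r, c)] else order) order) []
  read_order_to_perm grid nrows width order

-- ===== PORT B =====
-- grid[r] / row[c] are read with pyGetD: both index loops run over in-range indices only.
def gen_diagonal_alt (grid : List (List Int)) (nrows : Int) (width : Int) (anti : Bool) : List Int :=
  let pairs : List (Int × Int) :=
    (PySem.List.pyRange 0 (min nrows (grid.length : Int)) 1).foldl (fun pairs r =>
      let row := PySem.List.pyGetD grid r []
      (PySem.List.pyRange 0 (min width (row.length : Int)) 1).foldl (fun pairs c =>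
        let val := PySem.List.pyGetD row c 0
        if val ≥ 0 then
          pairs ++ [(if anti then r + (width - 1 - c) else r + c, val)]
        else pairs) pairs) []
  let buckets : PySem.Dict Int (List Int) :=
    pairs.foldl (fun b p => b.modify p.1 [] (fun l => l ++ [p.2])) PySem.Dict.empty
  (PySem.List.pyRange 0 (nrows + width - 1) 1).foldl (fun perm d => perm ++ buckets.getD d []) []

-- ===== PRECONDITION & SPEC =====
-- Pre_ excludes exactly the inputs where Python A raises IndexError: when there is at least one
-- cell (0 < nrows and 0 < width), the grid must have at least nrows rows and each of the first
-- nrows rows at least width entries.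
def Pre_gen_diagonal (grid : List (List Int)) (nrows : Int) (width : Int) (anti : Bool) : Prop :=
  0 < nrows → 0 < width →
    (nrows ≤ (grid.length : Int) ∧ ∀ row ∈ grid.take nrows.toNat, width ≤ (row.length : Int))
instance (grid : List (List Int)) (nrows : Int) (width : Int) (anti : Bool) : Decidable (Pre_gen_diagonal grid nrows width anti) := by unfold Pre_gen_diagonal; infer_instance

def pvWitness_gen_diagonal : List (List Int) × Int × Int × Bool := ([[1, -1], [2, 3]], 2, 2, false)

def Spec_gen_diagonal (grid : List (List Int)) (nrows : Int) (width : Int) (anti : Bool) (out : List Int) : Prop := out = gen_diagonal_alt grid nrows width anti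
instance (grid : List (List Int)) (nrows : Int) (width : Int) (anti : Bool) (out : List Int) : Decidable (Spec_gen_diagonal grid nrows width anti out) := by unfold Spec_gen_diagonal; infer_instance

-- ===== CLAIM (what is proved, stated in full; the proofs are below) =====
def Claim_equal_gen_diagonal : Prop := ∀ (grid : List (List Int)) (nrows : Int) (width : Int) (anti : Bool), Dom_gen_diagonal grid nrows width anti → Pre_gen_diagonal grid nrows width anti → Spec_gen_diagonal grid nrows width anti (gen_diagonal grid nrows width anti)

-- ===== LEMMAS AND PROOFS =====

-- the value contributed by cell (r, c): [grid[r][c]] if nonnegative, else []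
def pvCell (grid : List (List Int)) (r c : Int) : List Int :=
  let v := PySem.List.pyGetD (PySem.List.pyGetD grid r []) c 0
  if v ≥ 0 then [v] else []

-- the column A pairs with row r on diagonal d
def pvC (width : Int) (anti : Bool) (d r : Int) : Int :=
  if anti then width - 1 - (d - r) else d - r

-- A's contribution of one diagonal
def pvSpecD (grid : List (List Int)) (nrows width : Int) (anti : Bool) (d : Int) : List Int :=
  (PySem.List.pyRange (max 0 (d - width + 1)) (min nrows (d + 1)) 1).flatMap
    (fun r => pvCell grid r (pvC width anti d r))

-- the per-cell contribution read_order_to_perm makes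
def pvRO (grid : List (List Int)) (nrows ncols : Int) (rc : Int × Int) : List Int :=
  if 0 ≤ rc.1 ∧ rc.1 < nrows ∧ 0 ≤ rc.2 ∧ rc.2 < ncols then pvCell grid rc.1 rc.2 else []

-- B's scatter phase, flattened into a list of (diagonal key, value) pairs
def pvPairs (grid : List (List Int)) (nrows width : Int) (anti : Bool) : List (Int × Int) :=
  (PySem.List.pyRange 0 (min nrows (grid.length : Int)) 1).flatMap (fun r =>
    ((PySem.List.pyRange 0 (min width ((PySem.List.pyGetD grid r []).length : Int)) 1).filter
        (fun c => decide (PySem.List.pyGetD (PySem.List.pyGetD grid r []) c 0 ≥ 0))).map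
      (fun c => (if anti then r + (width - 1 - c) else r + c,
        PySem.List.pyGetD (PySem.List.pyGetD grid r []) c 0)))

theorem pv_flatMap_congr {α β : Type} {l : List α} {f g : α → List β}
    (h : ∀ x ∈ l, f x = g x) : l.flatMap f = l.flatMap g := by
  induction l with
  | nil => rfl
  | cons a l ih =>
      have h1 := h a (by simp)
      have h2 := ih (fun x hx => h x (by simp [hx]))
      simp only [List.flatMap_cons, h1, h2]

theorem pv_filter_flatMap {α β : Type} (l : List α) (f : α → List β) (p : β → Bool) :
    (l.flatMap f).filter p = l.flatMap (fun x => (f x).filter p) := by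
  induction l with
  | nil => rfl
  | cons a l ih => simp only [List.flatMap_cons, List.filter_append, ih]

theorem pv_filter_beq_nodup (l : List Int) (hl : l.Nodup) (x : Int) (q : Int → Bool) :
    l.filter (fun c => (c == x) && q c) = if x ∈ l then (if q x then [x] else []) else [] := by
  induction l with
  | nil => simp
  | cons a l ih =>
      rcases List.nodup_cons.mp hl with ⟨hna, hnd⟩
      rw [List.filter_cons, ih hnd]
      by_cases hax : a = x
      · subst hax
        have h1 : ((a == a) && q a) = q a := by simp
        rw [h1, if_neg hna, if_pos (List.mem_cons_self (a := a) (l := l))]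
      · have h1 : ((a == x) && q a) = false := by simp [hax]
        rw [h1]
        simp only [Bool.false_eq_true, if_false]
        have hmem : (x ∈ a :: l) ↔ (x ∈ l) := by
          constructor
          · intro h
            rcases List.mem_cons.mp h with h | h
            · exact absurd h.symm hax
            · exact h
          · exact fun h => List.mem_cons_of_mem a h
        by_cases hxl : x ∈ l
        · rw [if_pos hxl, if_pos (hmem.mpr hxl)]
        · rw [if_neg hxl, if_neg (fun h => hxl (hmem.mp h))]

theorem pv_filter_single (a b x : Int) (q : Int → Bool) :
    (PySem.List.pyRange a b 1).filter (fun c => (c == x) && q c) =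
      if a ≤ x ∧ x < b then (if q x then [x] else []) else [] := by
  rw [pv_filter_beq_nodup _ (PySem.List.nodup_pyRange_one a b) x q]
  by_cases h : a ≤ x ∧ x < b
  · rw [if_pos (PySem.List.mem_pyRange_one.mpr h), if_pos h]
  · rw [if_neg (fun hm => h (PySem.List.mem_pyRange_one.mp hm)), if_neg h]

theorem pv_flatMap_range_restrict (h : Int → List Int) (lo hi n : Int)
    (h0 : 0 ≤ lo) (hlh : lo ≤ hi) (hhn : hi ≤ n) (P : Int → Prop) [DecidablePred P]
    (hP : ∀ r, 0 ≤ r → r < n → (P r ↔ (lo ≤ r ∧ r < hi))) :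
    (PySem.List.pyRange 0 n 1).flatMap (fun r => if P r then h r else []) =
      (PySem.List.pyRange lo hi 1).flatMap h := by
  rw [PySem.List.pyRange_one_append 0 lo n h0 (le_trans hlh hhn),
      PySem.List.pyRange_one_append lo hi n hlh hhn,
      List.flatMap_append, List.flatMap_append]
  have hleft : (PySem.List.pyRange 0 lo 1).flatMap (fun r => if P r then h r else []) = [] := by
    rw [List.flatMap_eq_nil_iff]
    intro r hr
    rcases PySem.List.mem_pyRange_one.mp hr with ⟨h1, h2⟩
    rw [if_neg]
    intro hPr
    exact absurd ((hP r h1 (by omega)).mp hPr).1 (by omega)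
  have hright : (PySem.List.pyRange hi n 1).flatMap (fun r => if P r then h r else []) = [] := by
    rw [List.flatMap_eq_nil_iff]
    intro r hr
    rcases PySem.List.mem_pyRange_one.mp hr with ⟨h1, h2⟩
    rw [if_neg]
    intro hPr
    exact absurd ((hP r (by omega) h2).mp hPr).2 (by omega)
  have hmid : (PySem.List.pyRange lo hi 1).flatMap (fun r => if P r then h r else []) =
      (PySem.List.pyRange lo hi 1).flatMap h := by
    apply pv_flatMap_congr
    intro r hr
    rcases PySem.List.mem_pyRange_one.mp hr with ⟨h1, h2⟩
    exact if_pos ((hP r (by omega) (by omega)).mpr ⟨h1, h2⟩)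
  rw [hleft, hright, hmid]
  simp

theorem pv_read_order_eq (grid : List (List Int)) (nrows ncols : Int)
    (cell_order : List (Int × Int)) :
    read_order_to_perm grid nrows ncols cell_order =
      cell_order.flatMap (pvRO grid nrows ncols) := by
  unfold read_order_to_perm
  have hb : (fun (perm : List Int) (rc : Int × Int) =>
      if 0 ≤ rc.1 ∧ rc.1 < nrows ∧ 0 ≤ rc.2 ∧ rc.2 < ncols then
        let val := PySem.List.pyGetD (PySem.List.pyGetD grid rc.1 []) rc.2 0
        if val ≥ 0 then perm ++ [val] else perm
      else perm) =
      (fun perm rc => perm ++ pvRO grid nrows ncols rc) := by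
    funext perm rc
    by_cases h : 0 ≤ rc.1 ∧ rc.1 < nrows ∧ 0 ≤ rc.2 ∧ rc.2 < ncols
    · simp only [if_pos h, pvRO, pvCell]
      split <;> simp
    · simp [pvRO, if_neg h]
  rw [hb, PySem.List.foldl_append_eq_flatMap]
  simp

-- ===== A-side characterisation =====
theorem pv_A_char (grid : List (List Int)) (nrows width : Int) (anti : Bool) :
    gen_diagonal grid nrows width anti =
      (PySem.List.pyRange 0 (nrows + width - 1) 1).flatMap (pvSpecD grid nrows width anti) := by
  cases anti
  case false =>
    have e : gen_diagonal grid nrows width false = read_order_to_perm grid nrows width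
        ((PySem.List.pyRange 0 (nrows + width - 1) 1).foldl (fun order d =>
          (PySem.List.pyRange (max 0 (d - width + 1)) (min nrows (d + 1)) 1).foldl
            (fun order r => order ++ [(r, d - r)]) order) []) := rfl
    rw [e, pv_read_order_eq]
    have hout : (fun (order : List (Int × Int)) (d : Int) =>
        (PySem.List.pyRange (max 0 (d - width + 1)) (min nrows (d + 1)) 1).foldl
          (fun order r => order ++ [(r, d - r)]) order) =
        (fun order d => order ++
          (PySem.List.pyRange (max 0 (d - width + 1)) (min nrows (d + 1)) 1).map
            (fun r => (r, d - r))) :=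
      funext fun order => funext fun d => PySem.List.foldl_append_singleton_eq_map _ _ _
    rw [hout, PySem.List.foldl_append_eq_flatMap, List.nil_append, List.flatMap_assoc]
    apply pv_flatMap_congr
    intro d _
    rw [List.flatMap_map]
    unfold pvSpecD
    apply pv_flatMap_congr
    intro r hr
    rcases PySem.List.mem_pyRange_one.mp hr with ⟨h1, h2⟩
    have hb1 : (0:Int) ≤ r := by omega
    have hb2 : r < nrows := by omega
    have hb3 : (0:Int) ≤ d - r := by omega
    have hb4 : d - r < width := by omega
    show pvRO grid nrows width (r, d - r) = pvCell grid r (pvC width false d r)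
    have hc : pvC width false d r = d - r := rfl
    rw [hc]
    show (if 0 ≤ r ∧ r < nrows ∧ 0 ≤ d - r ∧ d - r < width then
        pvCell grid r (d - r) else []) = pvCell grid r (d - r)
    exact if_pos ⟨hb1, hb2, hb3, hb4⟩
  case true =>
    have e : gen_diagonal grid nrows width true = read_order_to_perm grid nrows width
        ((PySem.List.pyRange 0 (nrows + width - 1) 1).foldl (fun order d =>
          (PySem.List.pyRange (max 0 (d - width + 1)) (min nrows (d + 1)) 1).foldl
            (fun order r =>
              if 0 ≤ width - 1 - (d - r) ∧ width - 1 - (d - r) < width then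
                order ++ [(r, width - 1 - (d - r))]
              else order) order) []) := rfl
    rw [e, pv_read_order_eq]
    have hout : (fun (order : List (Int × Int)) (d : Int) =>
        (PySem.List.pyRange (max 0 (d - width + 1)) (min nrows (d + 1)) 1).foldl
          (fun order r =>
            if 0 ≤ width - 1 - (d - r) ∧ width - 1 - (d - r) < width then
              order ++ [(r, width - 1 - (d - r))]
            else order) order) =
        (fun order d => order ++
          ((PySem.List.pyRange (max 0 (d - width + 1)) (min nrows (d + 1)) 1).filter
            (fun r => decide (0 ≤ width - 1 - (d - r) ∧ width - 1 - (d - r) < width))).map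
              (fun r => (r, width - 1 - (d - r)))) :=
      funext fun order => funext fun d =>
        PySem.List.foldl_append_ite
          (fun r => 0 ≤ width - 1 - (d - r) ∧ width - 1 - (d - r) < width)
          (fun r => (r, width - 1 - (d - r))) _ order
    rw [hout, PySem.List.foldl_append_eq_flatMap, List.nil_append, List.flatMap_assoc]
    apply pv_flatMap_congr
    intro d _
    have hfs : (PySem.List.pyRange (max 0 (d - width + 1)) (min nrows (d + 1)) 1).filter
        (fun r => decide (0 ≤ width - 1 - (d - r) ∧ width - 1 - (d - r) < width)) =
        PySem.List.pyRange (max 0 (d - width + 1)) (min nrows (d + 1)) 1 := by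
      apply List.filter_eq_self.mpr
      intro r hr
      rcases PySem.List.mem_pyRange_one.mp hr with ⟨h1, h2⟩
      simp only [decide_eq_true_eq]
      omega
    rw [hfs, List.flatMap_map]
    unfold pvSpecD
    apply pv_flatMap_congr
    intro r hr
    rcases PySem.List.mem_pyRange_one.mp hr with ⟨h1, h2⟩
    have hb1 : (0:Int) ≤ r := by omega
    have hb2 : r < nrows := by omega
    have hb3 : (0:Int) ≤ width - 1 - (d - r) := by omega
    have hb4 : width - 1 - (d - r) < width := by omega
    show pvRO grid nrows width (r, width - 1 - (d - r)) =
      pvCell grid r (pvC width true d r)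
    have hc : pvC width true d r = width - 1 - (d - r) := rfl
    rw [hc]
    show (if 0 ≤ r ∧ r < nrows ∧ 0 ≤ width - 1 - (d - r) ∧ width - 1 - (d - r) < width then
        pvCell grid r (width - 1 - (d - r)) else []) = pvCell grid r (width - 1 - (d - r))
    exact if_pos ⟨hb1, hb2, hb3, hb4⟩

-- ===== B-side characterisation =====
theorem pv_getD_empty (d : Int) : (PySem.Dict.empty : PySem.Dict Int (List Int)).getD d [] = [] := by
  simp [PySem.Dict.empty, PySem.Dict.getD, PySem.Dict.get?]

theorem pv_B_char (grid : List (List Int)) (nrows width : Int) (anti : Bool) :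
    gen_diagonal_alt grid nrows width anti =
      (PySem.List.pyRange 0 (nrows + width - 1) 1).flatMap (fun d =>
        ((pvPairs grid nrows width anti).filter (fun p => p.1 == d)).map (fun p => p.2)) := by
  have hpairs : (PySem.List.pyRange 0 (min nrows (grid.length : Int)) 1).foldl (fun pairs r =>
      (PySem.List.pyRange 0 (min width ((PySem.List.pyGetD grid r []).length : Int)) 1).foldl
        (fun pairs c =>
          if PySem.List.pyGetD (PySem.List.pyGetD grid r []) c 0 ≥ 0 then
            pairs ++ [(if anti then r + (width - 1 - c) else r + c,
              PySem.List.pyGetD (PySem.List.pyGetD grid r []) c 0)]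
          else pairs) pairs) [] = pvPairs grid nrows width anti := by
    have hout : (fun (pairs : List (Int × Int)) (r : Int) =>
        (PySem.List.pyRange 0 (min width ((PySem.List.pyGetD grid r []).length : Int)) 1).foldl
          (fun pairs c =>
            if PySem.List.pyGetD (PySem.List.pyGetD grid r []) c 0 ≥ 0 then
              pairs ++ [(if anti then r + (width - 1 - c) else r + c,
                PySem.List.pyGetD (PySem.List.pyGetD grid r []) c 0)]
            else pairs) pairs) =
        (fun pairs r => pairs ++
          ((PySem.List.pyRange 0 (min width ((PySem.List.pyGetD grid r []).length : Int)) 1).filter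
              (fun c => decide (PySem.List.pyGetD (PySem.List.pyGetD grid r []) c 0 ≥ 0))).map
            (fun c => (if anti then r + (width - 1 - c) else r + c,
              PySem.List.pyGetD (PySem.List.pyGetD grid r []) c 0))) :=
      funext fun pairs => funext fun r =>
        PySem.List.foldl_append_ite
          (fun c => PySem.List.pyGetD (PySem.List.pyGetD grid r []) c 0 ≥ 0)
          (fun c => (if anti then r + (width - 1 - c) else r + c,
            PySem.List.pyGetD (PySem.List.pyGetD grid r []) c 0)) _ pairs
    rw [hout, PySem.List.foldl_append_eq_flatMap, List.nil_append]
    rfl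
  calc gen_diagonal_alt grid nrows width anti
      = (PySem.List.pyRange 0 (nrows + width - 1) 1).foldl (fun perm d => perm ++
          ((pvPairs grid nrows width anti).foldl
            (fun b p => b.modify p.1 [] (fun l => l ++ [p.2])) PySem.Dict.empty).getD d []) [] := by
        rw [← hpairs]
        rfl
    _ = (PySem.List.pyRange 0 (nrows + width - 1) 1).foldl (fun perm d => perm ++
          ((pvPairs grid nrows width anti).filter (fun p => p.1 == d)).map (fun p => p.2)) [] := by
        have hb : ∀ d : Int, ((pvPairs grid nrows width anti).foldl
            (fun b p => b.modify p.1 [] (fun l => l ++ [p.2])) PySem.Dict.empty).getD d [] =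
            ((pvPairs grid nrows width anti).filter (fun p => p.1 == d)).map (fun p => p.2) := by
          intro d
          rw [PySem.Dict.getD_foldl_modify_append, pv_getD_empty, List.nil_append]
        simp only [hb]
    _ = (PySem.List.pyRange 0 (nrows + width - 1) 1).flatMap (fun d =>
          ((pvPairs grid nrows width anti).filter (fun p => p.1 == d)).map (fun p => p.2)) := by
        rw [PySem.List.foldl_append_eq_flatMap, List.nil_append]

-- ===== per-diagonal equality under Pre_ =====
theorem pv_row (grid : List (List Int)) (width d r : Int) (anti : Bool) :
    ((((PySem.List.pyRange 0 width 1).filter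
        (fun c => decide (PySem.List.pyGetD (PySem.List.pyGetD grid r []) c 0 ≥ 0))).map
      (fun c => (if anti then r + (width - 1 - c) else r + c,
        PySem.List.pyGetD (PySem.List.pyGetD grid r []) c 0))).filter
          (fun p => p.1 == d)).map (fun p => p.2) =
    if 0 ≤ pvC width anti d r ∧ pvC width anti d r < width then
      pvCell grid r (pvC width anti d r)
    else [] := by
  rw [List.filter_map, List.map_map, List.filter_filter]
  have hpred : ∀ c ∈ PySem.List.pyRange 0 width 1,
      ((((fun p => p.1 == d) ∘ (fun c => ((if anti then r + (width - 1 - c) else r + c : Int),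
          PySem.List.pyGetD (PySem.List.pyGetD grid r []) c 0))) c) &&
        decide (PySem.List.pyGetD (PySem.List.pyGetD grid r []) c 0 ≥ 0)) =
      ((c == pvC width anti d r) &&
        decide (PySem.List.pyGetD (PySem.List.pyGetD grid r []) c 0 ≥ 0)) := by
    intro c _
    have hkey : (((if anti then r + (width - 1 - c) else r + c : Int)) == d) =
        (c == pvC width anti d r) := by
      cases anti
      · show ((r + c : Int) == d) = ((c : Int) == d - r)
        rw [Bool.eq_iff_iff]
        simp only [beq_iff_eq]
        omega
      · show ((r + (width - 1 - c) : Int) == d) = ((c : Int) == width - 1 - (d - r))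
        rw [Bool.eq_iff_iff]
        simp only [beq_iff_eq]
        omega
    simp only [Function.comp]
    rw [hkey]
  rw [List.filter_congr hpred, pv_filter_single]
  by_cases hA : 0 ≤ pvC width anti d r ∧ pvC width anti d r < width
  · rw [if_pos hA, if_pos hA]
    cases hv : decide (PySem.List.pyGetD (PySem.List.pyGetD grid r [])
        (pvC width anti d r) 0 ≥ 0)
    · have hv' := of_decide_eq_false hv
      simp [pvCell, hv']
    · have hv' := of_decide_eq_true hv
      simp [pvCell, hv']
  · rw [if_neg hA, if_neg hA]
    simp

theorem pv_main (grid : List (List Int)) (nrows width : Int) (anti : Bool)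
    (hpre : Pre_gen_diagonal grid nrows width anti) (d : Int) (hd0 : 0 ≤ d)
    (hd1 : d < nrows + width - 1) :
    ((pvPairs grid nrows width anti).filter (fun p => p.1 == d)).map (fun p => p.2) =
      pvSpecD grid nrows width anti d := by
  unfold Pre_gen_diagonal at hpre
  by_cases hnw : 0 < nrows ∧ 0 < width
  · obtain ⟨hn, hw⟩ := hnw
    obtain ⟨hlen, hrows⟩ := hpre hn hw
    have hrowlen : ∀ r : Int, 0 ≤ r → r < nrows →
        width ≤ ((PySem.List.pyGetD grid r []).length : Int) := by
      intro r h0 h1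
      have hrn : r.toNat < grid.length := by omega
      rw [PySem.List.pyGetD_eq_getElem grid [] h0 (by omega)]
      apply hrows
      have htake : r.toNat < (grid.take nrows.toNat).length := by
        simp only [List.length_take]
        omega
      have hgt : grid[r.toNat] = (grid.take nrows.toNat)[r.toNat]'htake :=
        (List.getElem_take).symm
      rw [hgt]
      exact List.getElem_mem htake
    have hmin1 : min nrows (grid.length : Int) = nrows := min_eq_left hlen
    have hpairs2 : pvPairs grid nrows width anti =
        (PySem.List.pyRange 0 nrows 1).flatMap (fun r =>
          ((PySem.List.pyRange 0 width 1).filter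
              (fun c => decide (PySem.List.pyGetD (PySem.List.pyGetD grid r []) c 0 ≥ 0))).map
            (fun c => (if anti then r + (width - 1 - c) else r + c,
              PySem.List.pyGetD (PySem.List.pyGetD grid r []) c 0))) := by
      unfold pvPairs
      rw [hmin1]
      apply pv_flatMap_congr
      intro r hr
      rcases PySem.List.mem_pyRange_one.mp hr with ⟨h1, h2⟩
      rw [min_eq_left (hrowlen r h1 h2)]
    rw [hpairs2, pv_filter_flatMap, List.map_flatMap]
    calc (PySem.List.pyRange 0 nrows 1).flatMap (fun r =>
          ((((PySem.List.pyRange 0 width 1).filter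
              (fun c => decide (PySem.List.pyGetD (PySem.List.pyGetD grid r []) c 0 ≥ 0))).map
            (fun c => (if anti then r + (width - 1 - c) else r + c,
              PySem.List.pyGetD (PySem.List.pyGetD grid r []) c 0))).filter
                (fun p => p.1 == d)).map (fun p => p.2))
        = (PySem.List.pyRange 0 nrows 1).flatMap (fun r =>
            if 0 ≤ pvC width anti d r ∧ pvC width anti d r < width then
              pvCell grid r (pvC width anti d r)
            else []) :=
          pv_flatMap_congr (fun r _ => pv_row grid width d r anti)
      _ = pvSpecD grid nrows width anti d := by
          unfold pvSpecD
          apply pv_flatMap_range_restrict (fun r => pvCell grid r (pvC width anti d r))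
            (max 0 (d - width + 1)) (min nrows (d + 1)) nrows (by omega) (by omega) (by omega)
          intro r h0 h1
          cases anti
          · show (0 ≤ d - r ∧ d - r < width) ↔ _
            omega
          · show (0 ≤ width - 1 - (d - r) ∧ width - 1 - (d - r) < width) ↔ _
            omega
  · have hp : pvPairs grid nrows width anti = [] := by
      unfold pvPairs
      rw [List.flatMap_eq_nil_iff]
      intro r hr
      rcases PySem.List.mem_pyRange_one.mp hr with ⟨h1, h2⟩
      have hw0 : width ≤ 0 := by omega
      rw [PySem.List.pyRange_one_eq_nil (le_trans (min_le_left _ _) hw0)]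
      rfl
    rw [hp]
    unfold pvSpecD
    rw [PySem.List.pyRange_one_eq_nil (by omega)]
    simp

-- ===== VERDICT (by name: the statement is the Claim_ definition above) =====
theorem gen_diagonal_spec : Claim_equal_gen_diagonal := by
  intro grid nrows width anti _hdom hpre
  unfold Spec_gen_diagonal
  rw [pv_A_char, pv_B_char]
  apply pv_flatMap_congr
  intro d hd
  rcases PySem.List.mem_pyRange_one.mp hd with ⟨h1, h2⟩
  exact (pv_main grid nrows width anti hpre d h1 h2).symm
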